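-- pv_equiv track=rewrite | github.com/zyy-cc/CS61A-Fall-2022 | Lecture Notes/Lecture24.py | fast_overlap
-- ===== SOURCE A (Python) =====
-- def fast_overlap(s, t):
--     """Return the overlap between sorted S and sorted T
--     >>> fast_overlap([2, 3, 5, 6, 7], [1, 4, 5, 6, 7, 8])
--     3
--     """
--     i, j, count = 0, 0, 0
--     while i < len(s) and j < len(t):
--         if s[i] == t[j]:
--             count, i, j = count + 1, i + 1, j + 1
--         elif s[i] < t[j]:
--             i += 1
--         else:
--             j += 1
--     return count
-- ===== SOURCE B (Python) =====
-- def fast_overlap(s, t):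
--     """Return the overlap between sorted S and sorted T
--     >>> fast_overlap([2, 3, 5, 6, 7], [1, 4, 5, 6, 7, 8])
--     3
--     """
--     def runs(xs):
--         out = []
--         for x in xs:
--             if out and out[-1][0] == x:
--                 out[-1] = (x, out[-1][1] + 1)
--             else:
--                 out.append((x, 1))
--         return out
--
--     rs, rt = runs(s), runs(t)
--     i, j, count = 0, 0, 0
--     while i < len(rs) and j < len(rt):
--         a, k = rs[i]
--         b, l = rt[j]
--         if a == b:
--             count += min(k, l)
--             if k == l:
--                 i, j = i + 1, j + 1
--             elif k < l:
--                 rt[j] = (b, l - k)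
--                 i += 1
--             else:
--                 rs[i] = (a, k - l)
--                 j += 1
--         elif a < b:
--             i += 1
--         else:
--             j += 1
--     return count
-- ===== Notes on version B (the rewrite author's own statement) =====
-- stated objective: alternative
-- what changed: Replaces the element-wise two-pointer merge by a run-length-encoding pass (group equal adjacent values with multiplicities) followed by a merge of distinct-value blocks that adds min(k,l) per matching block and carries the remainder, so matching happens per distinct run instead of per element.
import Mathlib
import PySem

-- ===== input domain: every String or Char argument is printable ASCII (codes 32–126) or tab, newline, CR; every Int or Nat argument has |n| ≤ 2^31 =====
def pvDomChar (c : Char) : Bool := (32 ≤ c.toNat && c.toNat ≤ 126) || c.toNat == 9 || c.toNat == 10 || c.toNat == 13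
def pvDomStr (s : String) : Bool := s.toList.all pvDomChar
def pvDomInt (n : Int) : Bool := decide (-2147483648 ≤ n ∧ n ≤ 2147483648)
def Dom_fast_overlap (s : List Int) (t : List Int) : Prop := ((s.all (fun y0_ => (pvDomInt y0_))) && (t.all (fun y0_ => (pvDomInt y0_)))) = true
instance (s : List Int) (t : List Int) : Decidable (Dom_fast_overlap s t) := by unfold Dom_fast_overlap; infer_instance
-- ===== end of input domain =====

-- B replaces the element-wise two-pointer merge by run-length encoding both lists and
-- merging distinct-value blocks, adding min of the multiplicities and carrying remainders.

-- ===== PORT A =====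
-- the while loop of A, with its indices i, j and the accumulator count; the fuel
-- argument is only a structural totality guard (the loop runs at most |s|+|t| steps)
def fast_overlapLoop (s : List Int) (t : List Int) : Nat → Nat → Nat → Int → Int
  | 0, _, _, count => count
  | fuel + 1, i, j, count =>
    if h : i < s.length ∧ j < t.length then
      if s[i]'h.1 = t[j]'h.2 then fast_overlapLoop s t fuel (i + 1) (j + 1) (count + 1)
      else if s[i]'h.1 < t[j]'h.2 then fast_overlapLoop s t fuel (i + 1) j count
      else fast_overlapLoop s t fuel i (j + 1) count
    else count

def fast_overlap (s : List Int) (t : List Int) : Int :=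
  fast_overlapLoop s t (s.length + t.length) 0 0 0

-- ===== PORT B =====
-- Source B's runs(): 'if out and out[-1][0] == x: out[-1] = (x, out[-1][1] + 1) else: out.append((x, 1))'
def runsStep (out : List (Int × Int)) (x : Int) : List (Int × Int) :=
  if h : out ≠ [] then
    if (out.getLast h).1 = x then out.set (out.length - 1) (x, (out.getLast h).2 + 1)
    else out ++ [(x, 1)]
  else out ++ [(x, 1)]

def runs (xs : List Int) : List (Int × Int) := xs.foldl runsStep []

-- Source B's while loop over the two run lists, with its indices i, j, the in-place updates
-- rs[i] = (a, k - l) / rt[j] = (b, l - k) and the accumulator count; the fuel argument is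
-- only a structural totality guard (every iteration advances i or j)
def fast_overlapLoopB : Nat → List (Int × Int) → List (Int × Int) → Nat → Nat → Int → Int
  | 0, _, _, _, _, count => count
  | fuel + 1, rs, rt, i, j, count =>
    if h : i < rs.length ∧ j < rt.length then
      let a := (rs[i]'h.1).1
      let k := (rs[i]'h.1).2
      let b := (rt[j]'h.2).1
      let l := (rt[j]'h.2).2
      if a = b then
        if k = l then fast_overlapLoopB fuel rs rt (i + 1) (j + 1) (count + min k l)
        else if k < l then fast_overlapLoopB fuel rs (rt.set j (b, l - k)) (i + 1) j (count + min k l)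
        else fast_overlapLoopB fuel (rs.set i (a, k - l)) rt i (j + 1) (count + min k l)
      else if a < b then fast_overlapLoopB fuel rs rt (i + 1) j count
      else fast_overlapLoopB fuel rs rt i (j + 1) count
    else count

def fast_overlap_alt (s : List Int) (t : List Int) : Int :=
  let rs := runs s
  let rt := runs t
  fast_overlapLoopB (rs.length + rt.length) rs rt 0 0 0

-- ===== PRECONDITION & SPEC =====
def Spec_fast_overlap (s : List Int) (t : List Int) (out : Int) : Prop := out = fast_overlap_alt s t
instance (s : List Int) (t : List Int) (out : Int) : Decidable (Spec_fast_overlap s t out) := by unfold Spec_fast_overlap; infer_instance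

-- ===== CLAIM (what is proved, stated in full; the proofs are below) =====
def Claim_equal_fast_overlap : Prop := ∀ (s : List Int) (t : List Int), Dom_fast_overlap s t → Spec_fast_overlap s t (fast_overlap s t)

-- ===== LEMMAS AND PROOFS =====

-- the merge count of A, written on the list suffixes (proof-only helper)
def mc : List Int → List Int → Int
  | [], _ => 0
  | _ :: _, [] => 0
  | a :: s, b :: t =>
    if a = b then 1 + mc s t
    else if a < b then mc s (b :: t)
    else mc (a :: s) t

-- the block merge of B, written on the run-list suffixes (proof-only helper)
def mcR : List (Int × Int) → List (Int × Int) → Int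
  | [], _ => 0
  | _ :: _, [] => 0
  | (a, k) :: rs, (b, l) :: rt =>
    if a = b then
      if k = l then min k l + mcR rs rt
      else if k < l then min k l + mcR rs ((b, l - k) :: rt)
      else min k l + mcR ((a, k - l) :: rs) rt
    else if a < b then mcR rs ((b, l) :: rt)
    else mcR ((a, k) :: rs) rt
termination_by rs rt => rs.length + rt.length
decreasing_by all_goals (simp only [List.length_cons]; omega)

-- decompress a run list back to the list it encodes (proof-only helper)
def flatR (rs : List (Int × Int)) : List Int :=
  rs.flatMap (fun p => List.replicate p.2.toNat p.1)

lemma mc_nil_right (s : List Int) : mc s [] = 0 := by cases s <;> simp [mc]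

lemma loop_eq_mc (s t : List Int) (fuel : Nat) :
    ∀ (i j : Nat) (c : Int), s.length - i + (t.length - j) ≤ fuel →
      fast_overlapLoop s t fuel i j c = c + mc (s.drop i) (t.drop j) := by
  induction fuel with
  | zero =>
    intro i j c hf
    have hd : s.drop i = [] := List.drop_eq_nil_of_le (by omega)
    rw [fast_overlapLoop, hd]
    simp [mc]
  | succ fuel ih =>
    intro i j c hf
    rw [fast_overlapLoop]
    by_cases h : i < s.length ∧ j < t.length
    · rw [dif_pos h]
      by_cases heq : s[i]'h.1 = t[j]'h.2
      · rw [if_pos heq, ih (i + 1) (j + 1) (c + 1) (by omega),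
            List.drop_eq_getElem_cons h.1, List.drop_eq_getElem_cons h.2]
        simp only [mc]
        rw [if_pos heq]
        ring
      · rw [if_neg heq]
        by_cases hlt : s[i]'h.1 < t[j]'h.2
        · rw [if_pos hlt, ih (i + 1) j c (by omega),
              List.drop_eq_getElem_cons h.1, List.drop_eq_getElem_cons h.2]
          simp only [mc]
          rw [if_neg heq, if_pos hlt, ← List.drop_eq_getElem_cons h.2]
        · rw [if_neg hlt, ih i (j + 1) c (by omega),
              List.drop_eq_getElem_cons h.1, List.drop_eq_getElem_cons h.2]
          simp only [mc]
          rw [if_neg heq, if_neg hlt, ← List.drop_eq_getElem_cons h.1]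
    · rw [dif_neg h]
      rcases Nat.lt_or_ge i s.length with hi | hi
      · have hd : t.drop j = [] := List.drop_eq_nil_of_le (by omega)
        rw [hd, mc_nil_right]; ring
      · have hd : s.drop i = [] := List.drop_eq_nil_of_le (by omega)
        rw [hd]; simp [mc]

-- B's loop computes mcR on the run-list suffixes
lemma flatR_append (u v : List (Int × Int)) : flatR (u ++ v) = flatR u ++ flatR v := by
  simp [flatR]

lemma set_last_eq (v : Int × Int) : ∀ (out : List (Int × Int)), out ≠ [] →
    out.set (out.length - 1) v = out.dropLast ++ [v] := by
  intro out
  induction out with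
  | nil => intro h; simp at h
  | cons p q ih =>
    intro _
    cases q with
    | nil => simp
    | cons r w =>
      have hne : r :: w ≠ [] := by simp
      have hlen : (p :: r :: w).length - 1 = ((r :: w).length - 1) + 1 := by simp
      rw [hlen, List.set_cons_succ, ih hne, List.dropLast_cons_of_ne_nil hne, List.cons_append]

lemma drop_set_eq (rt : List (Int × Int)) (j : Nat) (hj : j < rt.length) (v : Int × Int) :
    (rt.set j v).drop j = v :: rt.drop (j + 1) := by
  rw [List.drop_eq_getElem_cons (by simpa using hj)]
  rw [List.getElem_set_self]
  congr 1
  rw [List.drop_set_of_lt]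
  omega

lemma mcR_nil_right (rs : List (Int × Int)) : mcR rs [] = 0 := by cases rs <;> simp [mcR]

lemma runsStep_flat (out : List (Int × Int)) (x : Int) (hpos : ∀ p ∈ out, 0 < p.2) :
    flatR (runsStep out x) = flatR out ++ [x] ∧ ∀ p ∈ runsStep out x, 0 < p.2 := by
  unfold runsStep
  by_cases h : out ≠ []
  · rw [dif_pos h]
    by_cases he : (out.getLast h).1 = x
    · rw [if_pos he]
      have hm : 0 < (out.getLast h).2 := hpos _ (List.getLast_mem h)
      have hout : out.dropLast ++ [out.getLast h] = out := List.dropLast_append_getLast h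
      rw [set_last_eq _ _ h]
      constructor
      · conv_rhs => rw [← hout]
        rw [flatR_append, flatR_append]
        have h1 : flatR [(x, (out.getLast h).2 + 1)]
            = List.replicate (out.getLast h).2.toNat x ++ [x] := by
          have : ((out.getLast h).2 + 1).toNat = (out.getLast h).2.toNat + 1 := by omega
          simp only [flatR, List.flatMap_cons, List.flatMap_nil, List.append_nil, this,
            List.replicate_succ']
        have h2 : flatR [out.getLast h] = List.replicate (out.getLast h).2.toNat x := by
          simp only [flatR, List.flatMap_cons, List.flatMap_nil, List.append_nil, he]
        rw [h1, h2, List.append_assoc]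
      · intro p hp
        rcases List.mem_append.1 hp with hp | hp
        · exact hpos p (List.dropLast_subset _ hp)
        · simp only [List.mem_singleton] at hp
          subst hp
          simp only []
          omega
    · rw [if_neg he]
      refine ⟨by simp [flatR], ?_⟩
      intro p hp
      rcases List.mem_append.1 hp with hp | hp
      · exact hpos p hp
      · simp only [List.mem_singleton] at hp; subst hp; norm_num
  · rw [dif_neg h]
    rw [not_not] at h
    subst h
    refine ⟨by simp [flatR], ?_⟩
    intro p hp
    simp only [List.nil_append, List.mem_singleton] at hp
    subst hp; norm_num

lemma runs_fold : ∀ (xs : List Int) (out : List (Int × Int)), (∀ p ∈ out, 0 < p.2) →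
    flatR (xs.foldl runsStep out) = flatR out ++ xs ∧ ∀ p ∈ xs.foldl runsStep out, 0 < p.2 := by
  intro xs
  induction xs with
  | nil => intro out h; simpa using h
  | cons x xs ih =>
    intro out h
    rw [List.foldl_cons]
    obtain ⟨h1, h2⟩ := runsStep_flat out x h
    obtain ⟨h3, h4⟩ := ih _ h2
    exact ⟨by rw [h3, h1, List.append_assoc]; rfl, h4⟩

lemma loopB_eq_mcR (fuel : Nat) :
    ∀ (rs rt : List (Int × Int)) (i j : Nat) (c : Int),
      rs.length - i + (rt.length - j) ≤ fuel →
      fast_overlapLoopB fuel rs rt i j c = c + mcR (rs.drop i) (rt.drop j) := by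
  induction fuel with
  | zero =>
    intro rs rt i j c hf
    have hd : rs.drop i = [] := List.drop_eq_nil_of_le (by omega)
    rw [fast_overlapLoopB, hd]
    simp [mcR]
  | succ fuel ih =>
    intro rs rt i j c hf
    rw [fast_overlapLoopB]
    by_cases h : i < rs.length ∧ j < rt.length
    · rw [dif_pos h]
      simp only []
      rcases hp : rs[i]'h.1 with ⟨a, k⟩
      rcases hq : rt[j]'h.2 with ⟨b, l⟩
      dsimp only
      have hds : rs.drop i = (a, k) :: rs.drop (i + 1) := by
        rw [List.drop_eq_getElem_cons h.1, hp]
      have hdt : rt.drop j = (b, l) :: rt.drop (j + 1) := by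
        rw [List.drop_eq_getElem_cons h.2, hq]
      by_cases hab : a = b
      · rw [if_pos hab]
        by_cases hkl : k = l
        · rw [if_pos hkl, ih rs rt (i + 1) (j + 1) _ (by omega), hds, hdt]
          simp only [mcR, if_pos hab, if_pos hkl]
          ring
        · rw [if_neg hkl]
          by_cases hlt : k < l
          · rw [if_pos hlt,
                ih rs (rt.set j (b, l - k)) (i + 1) j _ (by simp only [List.length_set]; omega),
                drop_set_eq rt j h.2, hds, hdt]
            simp only [mcR, if_pos hab, if_neg hkl, if_pos hlt]
            ring
          · rw [if_neg hlt,
                ih (rs.set i (a, k - l)) rt i (j + 1) _ (by simp only [List.length_set]; omega),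
                drop_set_eq rs i h.1, hds, hdt]
            simp only [mcR, if_pos hab, if_neg hkl, if_neg hlt]
            ring
      · rw [if_neg hab]
        by_cases hab2 : a < b
        · rw [if_pos hab2, ih rs rt (i + 1) j _ (by omega), hds, hdt]
          simp only [mcR, if_neg hab, if_pos hab2]
        · rw [if_neg hab2, ih rs rt i (j + 1) _ (by omega), hds, hdt]
          simp only [mcR, if_neg hab, if_neg hab2]
    · rw [dif_neg h]
      rcases Nat.lt_or_ge i rs.length with hi | hi
      · have hd : rt.drop j = [] := List.drop_eq_nil_of_le (by omega)
        rw [hd, mcR_nil_right]; ring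
      · have hd : rs.drop i = [] := List.drop_eq_nil_of_le (by omega)
        rw [hd]; simp [mcR]

-- the runs pass decodes back to its input and yields positive multiplicities
lemma runs_spec (xs : List Int) :
    flatR (runs xs) = xs ∧ ∀ p ∈ runs xs, 0 < p.2 := by
  have := runs_fold xs [] (by simp)
  simpa [runs, flatR] using this

-- matching a shared prefix of m equal elements contributes m to the merge count
lemma mc_repl_eq (a : Int) (m : Nat) (x y : List Int) :
    mc (List.replicate m a ++ x) (List.replicate m a ++ y) = m + mc x y := by
  induction m with
  | zero => simp
  | succ m ih =>
    simp only [List.replicate_succ, List.cons_append, mc, ih]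
    push_cast; ring

-- a run of elements smaller than the other head is skipped by the merge
lemma mc_repl_lt {a b : Int} (hab : a < b) (m : Nat) (x w : List Int) :
    mc (List.replicate m a ++ x) (b :: w) = mc x (b :: w) := by
  induction m with
  | zero => simp
  | succ m ih =>
    simp only [List.replicate_succ, List.cons_append, mc, if_neg (by omega : ¬ a = b),
      if_pos hab, ih]

lemma mc_repl_gt {a b : Int} (hba : b < a) (m : Nat) (w y : List Int) :
    mc (a :: w) (List.replicate m b ++ y) = mc (a :: w) y := by
  induction m with
  | zero => simp
  | succ m ih =>
    simp only [List.replicate_succ, List.cons_append, mc, if_neg (by omega : ¬ a = b),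
      if_neg (by omega : ¬ a < b), ih]

-- the block merge agrees with the element merge on decompressed run lists
lemma flatR_cons (p : Int × Int) (rs : List (Int × Int)) :
    flatR (p :: rs) = List.replicate p.2.toNat p.1 ++ flatR rs := by
  simp [flatR]

lemma mcR_eq_mc_flat :
    ∀ (rs rt : List (Int × Int)), (∀ p ∈ rs, 0 < p.2) → (∀ p ∈ rt, 0 < p.2) →
      mcR rs rt = mc (flatR rs) (flatR rt) := by
  intro rs rt
  induction rs, rt using mcR.induct with
  | case1 rt => intro _ _; simp [mcR, flatR, mc]
  | case2 p rs => intro _ _; simp [mcR, flatR, mc_nil_right]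
  | case3 rs a k rt ih =>
    intro hs ht
    have hk : 0 < k := hs (a, k) (by simp)
    rw [mcR, if_pos rfl, if_pos rfl, flatR_cons, flatR_cons,
        ih (fun p hp => hs p (by simp [hp])) (fun p hp => ht p (by simp [hp])),
        mc_repl_eq]
    simp; omega
  | case4 k rs a l rt h1 h2 ih =>
    intro hs ht
    have hk : 0 < k := hs (a, k) (by simp)
    have hrepl : List.replicate l.toNat a = List.replicate k.toNat a ++ List.replicate (l - k).toNat a := by
      rw [← List.replicate_add]
      congr 1
      omega
    rw [mcR, if_pos rfl, if_neg h1, if_pos h2, flatR_cons, flatR_cons]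
    simp only [hrepl, List.append_assoc]
    rw [mc_repl_eq,
        ih (fun p hp => hs p (by simp [hp]))
           (fun p hp => by
             rcases List.mem_cons.1 hp with h | h
             · subst h; simpa using (by omega : (0:Int) < l - k)
             · exact ht p (by simp [h])),
        flatR_cons]
    simp; omega
  | case5 k rs a l rt h1 h2 ih =>
    intro hs ht
    have hl : 0 < l := ht (a, l) (by simp)
    have hrepl : List.replicate k.toNat a = List.replicate l.toNat a ++ List.replicate (k - l).toNat a := by
      rw [← List.replicate_add]
      congr 1
      omega
    rw [mcR, if_pos rfl, if_neg h1, if_neg h2, flatR_cons, flatR_cons]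
    simp only [hrepl, List.append_assoc]
    rw [mc_repl_eq,
        ih (fun p hp => by
             rcases List.mem_cons.1 hp with h | h
             · subst h; simpa using (by omega : (0:Int) < k - l)
             · exact hs p (by simp [h]))
           (fun p hp => ht p (by simp [hp])),
        flatR_cons]
    simp; omega
  | case6 a k rs b l rt h1 h2 ih =>
    intro hs ht
    have hl : 0 < l := ht (b, l) (by simp)
    have hd : flatR ((b, l) :: rt) = b :: (List.replicate (l.toNat - 1) b ++ flatR rt) := by
      rw [flatR_cons]
      have : l.toNat = (l.toNat - 1) + 1 := by omega
      rw [this, List.replicate_succ]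
      simp
    rw [mcR, if_neg h1, if_pos h2, flatR_cons,
        ih (fun p hp => hs p (by simp [hp])) ht]
    simp only [hd]
    rw [mc_repl_lt h2]
  | case7 a k rs b l rt h1 h2 ih =>
    intro hs ht
    have hk : 0 < k := hs (a, k) (by simp)
    have hba : b < a := by omega
    have hd : flatR ((a, k) :: rs) = a :: (List.replicate (k.toNat - 1) a ++ flatR rs) := by
      rw [flatR_cons]
      have : k.toNat = (k.toNat - 1) + 1 := by omega
      rw [this, List.replicate_succ]
      simp
    rw [mcR, if_neg h1, if_neg h2, flatR_cons (p := (b, l)),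
        ih hs (fun p hp => ht p (by simp [hp]))]
    simp only [hd]
    rw [mc_repl_gt hba]

-- ===== VERDICT (by name: the statement is the Claim_ definition above) =====
theorem fast_overlap_spec : Claim_equal_fast_overlap := by
  intro s t _
  unfold Spec_fast_overlap fast_overlap fast_overlap_alt
  rw [loop_eq_mc s t (s.length + t.length) 0 0 0 (by omega), List.drop_zero, List.drop_zero,
      loopB_eq_mcR _ _ _ 0 0 0 (by omega), List.drop_zero, List.drop_zero,
      mcR_eq_mc_flat _ _ (runs_spec s).2 (runs_spec t).2, (runs_spec s).1, (runs_spec t).1]
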